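-- pv_equiv track=rewrite | github.com/robert-ancell/jpegsuite | generate/jpeg.py | get_amplitude_length
-- ===== SOURCE A (Python) =====
-- def get_amplitude_length(value):
--     assert value <= 32768
--     if value < 0:
--         value = -value
--     length = 0
--     while value != 0:
--         value >>= 1
--         length += 1
--     return length
-- ===== SOURCE B (Python) =====
-- def get_amplitude_length(value):
--     assert value <= 32768
--     return abs(value).bit_length()
-- ===== Notes on version B (the rewrite author's own statement) =====
-- stated objective: idiomatic
-- what changed: Replaced the manual shift-and-count loop (with explicit negation) by the closed-form built-in abs(value).bit_length().
import Mathlib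
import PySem

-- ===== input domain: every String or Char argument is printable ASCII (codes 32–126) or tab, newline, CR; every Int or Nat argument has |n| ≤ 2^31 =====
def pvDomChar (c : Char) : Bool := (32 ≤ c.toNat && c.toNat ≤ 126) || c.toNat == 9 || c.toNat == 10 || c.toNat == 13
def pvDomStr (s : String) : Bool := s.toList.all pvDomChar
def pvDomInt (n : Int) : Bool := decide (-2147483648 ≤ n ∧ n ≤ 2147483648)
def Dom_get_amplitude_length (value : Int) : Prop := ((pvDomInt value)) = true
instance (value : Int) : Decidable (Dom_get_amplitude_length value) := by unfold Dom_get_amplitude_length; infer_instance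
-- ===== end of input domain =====

-- B replaces A's shift-and-count loop by the closed-form bit-length (idiomatic).

-- ===== PORT A =====
-- the 'while value != 0: value >>= 1; length += 1' loop, on the (nonnegative) value after negation
def pvALoop : Nat -> Int -> Int
  | 0, length => length
  | v + 1, length => pvALoop ((v + 1) / 2) (length + 1)

def get_amplitude_length (value : Int) : Int :=
  let value' := if value < 0 then -value else value
  pvALoop value'.toNat 0

-- ===== PORT B =====
-- abs(value).bit_length() is Nat.size of the absolute value
def get_amplitude_length_alt (value : Int) : Int :=
  (Nat.size value.natAbs : Int)

-- ===== PRECONDITION & SPEC =====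
-- Pre_ excludes exactly the inputs where A's 'assert value <= 32768' raises AssertionError
def Pre_get_amplitude_length (value : Int) : Prop := value <= 32768
instance (value : Int) : Decidable (Pre_get_amplitude_length value) := by unfold Pre_get_amplitude_length; infer_instance
def pvWitness_get_amplitude_length : Int := 100

def Spec_get_amplitude_length (value : Int) (out : Int) : Prop := out = get_amplitude_length_alt value
instance (value : Int) (out : Int) : Decidable (Spec_get_amplitude_length value out) := by unfold Spec_get_amplitude_length; infer_instance

-- ===== CLAIM (what is proved, stated in full; the proofs are below) =====
def Claim_equal_get_amplitude_length : Prop := ∀ (value : Int), Dom_get_amplitude_length value → Pre_get_amplitude_length value → Spec_get_amplitude_length value (get_amplitude_length value)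

-- ===== LEMMAS AND PROOFS =====
theorem pv_size_succ_div2 (v : Nat) : Nat.size (v + 1) = Nat.size ((v + 1) / 2) + 1 := by
  conv_lhs => rw [← Nat.bit_decide_mod_two_eq_one_shiftRight_one (v + 1)]
  rw [Nat.size_bit (by rw [Nat.bit_decide_mod_two_eq_one_shiftRight_one]; omega)]
  rw [Nat.shiftRight_one]

theorem pvALoop_size (n : Nat) : ∀ len : Int, pvALoop n len = len + (Nat.size n : Int) := by
  induction n using Nat.strong_induction_on with
  | _ n ih =>
    intro len
    match n with
    | 0 => simp [pvALoop, Nat.size]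
    | v + 1 =>
      rw [pvALoop, ih ((v + 1) / 2) (Nat.div_lt_self (Nat.succ_pos v) (by norm_num)),
        pv_size_succ_div2 v]
      push_cast
      ring

-- ===== VERDICT (by name: the statement is the Claim_ definition above) =====
theorem get_amplitude_length_spec : Claim_equal_get_amplitude_length := by
  intro value _ _
  unfold Spec_get_amplitude_length get_amplitude_length get_amplitude_length_alt
  simp only [pvALoop_size]
  have h : (if value < 0 then -value else value).toNat = value.natAbs := by
    split_ifs with h <;> omega
  rw [h]; ring
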